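-- pv_equiv track=rewrite | github.com/rhysnewell/ChIP-R | twobit.py | byte_to_bases
-- ===== SOURCE A (Python) =====
-- def byte_to_bases(x):
--     """convert one byte to the four bases it encodes"""
--     c = (x >> 4) & 0xf
--     f = x & 0xf
--     cc = (c >> 2) & 0x3
--     cf = c & 0x3
--     fc = (f >> 2) & 0x3
--     ff = f & 0x3
--     return [bits_to_base(X) for X in (cc, cf, fc, ff)]
--
-- def bits_to_base(x):
--     """convert integer representation of two bits to correct base"""
--     if x is 0:
--         return 'T'
--     elif x is 1:
--         return 'C'
--     elif x is 2:
--         return 'A'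
--     elif x is 3:
--         return 'G'
--     else:
--         raise ValueError('Only integers 0-3 are valid inputs')
-- ===== SOURCE B (Python) =====
-- # B: one precomputed 256-entry table replaces the per-call nibble cascade and if/elif ladder.
-- BASES = [["TCAG"[(b >> s) & 3] for s in (6, 4, 2, 0)] for b in range(256)]
--
-- def byte_to_bases(x):
--     """convert one byte to the four bases it encodes"""
--     return list(BASES[x % 256])
-- ===== Notes on version B (the rewrite author's own statement) =====
-- stated objective: simpler
-- what changed: Replaces the per-call nibble-splitting cascade and four-way if/elif ladder with a module-level 256-entry lookup table indexed by x % 256, built once by direct 2-bit decoding.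
import Mathlib
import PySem

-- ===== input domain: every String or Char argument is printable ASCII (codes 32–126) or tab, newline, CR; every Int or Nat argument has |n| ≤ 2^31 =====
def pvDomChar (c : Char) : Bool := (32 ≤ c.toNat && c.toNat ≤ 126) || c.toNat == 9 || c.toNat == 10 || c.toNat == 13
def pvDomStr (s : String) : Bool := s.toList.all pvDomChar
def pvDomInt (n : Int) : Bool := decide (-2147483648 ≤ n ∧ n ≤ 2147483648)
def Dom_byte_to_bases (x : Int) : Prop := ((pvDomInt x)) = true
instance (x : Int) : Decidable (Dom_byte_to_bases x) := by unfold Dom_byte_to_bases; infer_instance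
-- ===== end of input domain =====

-- B replaces A's per-call nibble cascade and if/elif ladder by one precomputed 256-entry table (objective: simpler).

-- ===== PORT A =====
-- 'x is 0' etc. on small CPython ints behaves as equality; the final 'raise ValueError' branch is none here
-- (unreachable from byte_to_bases: every argument is masked with & 0x3).
def bits_to_base (x : Int) : Option String :=
  if x = 0 then some "T"
  else if x = 1 then some "C"
  else if x = 2 then some "A"
  else if x = 3 then some "G"
  else none

def byte_to_bases (x : Int) : List String :=
  let c := PySem.Int.band (x >>> (4:Nat)) 0xf
  let f := PySem.Int.band x 0xf
  let cc := PySem.Int.band (c >>> (2:Nat)) 0x3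
  let cf := PySem.Int.band c 0x3
  let fc := PySem.Int.band (f >>> (2:Nat)) 0x3
  let ff := PySem.Int.band f 0x3
  -- .getD "": the none (ValueError) case is unreachable, each X is in [0,3]
  [cc, cf, fc, ff].map (fun X => (bits_to_base X).getD "")

-- ===== PORT B =====
-- BASES = [["TCAG"[(b >> s) & 3] for s in (6, 4, 2, 0)] for b in range(256)]
-- "TCAG"[i] via pyGet?; .getD "" / .getD []: the none (IndexError) cases are unreachable (indices in range).
def pvBASES : List (List String) :=
  (PySem.List.pyRange 0 256 1).map (fun b =>
    ([6, 4, 2, 0] : List Nat).map (fun s =>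
      ((PySem.Str.pyGet? "TCAG" (PySem.Int.band (b >>> s) 3)).map Char.toString).getD ""))

def byte_to_bases_alt (x : Int) : List String :=
  (PySem.List.pyGet? pvBASES (PySem.Int.mod x 256)).getD []

-- ===== PRECONDITION & SPEC =====
def Spec_byte_to_bases (x : Int) (out : List String) : Prop := out = byte_to_bases_alt x
instance (x : Int) (out : List String) : Decidable (Spec_byte_to_bases x out) := by unfold Spec_byte_to_bases; infer_instance

-- ===== CLAIM (what is proved, stated in full; the proofs are below) =====
def Claim_equal_byte_to_bases : Prop := ∀ (x : Int), Dom_byte_to_bases x → Spec_byte_to_bases x (byte_to_bases x)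

-- ===== LEMMAS AND PROOFS =====

theorem pv_band_mask (x : Int) (k : Nat) : PySem.Int.band x ((2:Int)^k - 1) = x % (2:Int)^k := by
  have hp : (0:Int) < 2^k := by positivity
  have hpn : 0 < 2^k := Nat.two_pow_pos k
  have hcast : ((2^k - 1 : Nat) : Int) = 2^k - 1 := by
    push_cast [Nat.cast_sub (Nat.one_le_two_pow)]; ring
  unfold PySem.Int.band
  by_cases hx : 0 ≤ x
  · rw [if_pos hx, if_pos (by omega)]
    have h2 : ((2:Int)^k - 1).toNat = 2^k - 1 := by omega
    rw [h2, Nat.and_two_pow_sub_one_eq_mod]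
    push_cast
    rw [Int.toNat_of_nonneg hx]
  · rw [if_neg hx, if_pos (by omega)]
    set m : Nat := (-x - 1).toNat with hm
    have hxm : x = -((m : Int) + 1) := by omega
    have h2 : ((2:Int)^k - 1).toNat = 2^k - 1 := by omega
    rw [h2, Nat.and_comm, Nat.and_two_pow_sub_one_eq_mod]
    set r : Nat := m % 2^k with hr
    have hrlt : r < 2^k := Nat.mod_lt _ hpn
    have hdecomp : (m : Int) = 2^k * (m / 2^k : Nat) + r := by
      push_cast [hr]
      exact (Int.ediv_add_emod (m:Int) (2^k)).symm
    have hxr : x % 2^k = 2^k - 1 - r := by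
      have : x = (2^k - 1 - (r:Int)) + 2^k * (-((m / 2^k : Nat) : Int) - 1) := by
        rw [hxm, hdecomp]; push_cast; ring
      rw [this, Int.add_mul_emod_self_left, Int.emod_eq_of_lt (by omega) (by omega)]
    rw [hxr]
    push_cast [Nat.cast_sub (by omega : r ≤ 2^k - 1), hcast]
    ring

theorem pv_band15 (y : Int) : PySem.Int.band y 15 = y % 16 := by
  have := pv_band_mask y 4; norm_num at this; exact this

theorem pv_band3 (y : Int) : PySem.Int.band y 3 = y % 4 := by
  have := pv_band_mask y 2; norm_num at this; exact this

theorem byte_to_bases_mod (x : Int) : byte_to_bases x = byte_to_bases (x % 256) := by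
  simp only [byte_to_bases, Int.shiftRight_eq_div_pow, pv_band15, pv_band3]
  norm_num
  repeat' apply And.intro
  all_goals exact congrArg (fun X => (bits_to_base X).getD "") (by omega)
theorem byte_to_bases_alt_mod (x : Int) : byte_to_bases_alt x = byte_to_bases_alt (x % 256) := by
  simp [byte_to_bases_alt, Int.emod_emod_of_dvd x (dvd_refl 256)]

set_option maxRecDepth 8192 in
set_option maxHeartbeats 2000000 in
theorem pv_key : ∀ n : Fin 256, byte_to_bases (n : Int) = byte_to_bases_alt (n : Int) := by
  decide

-- ===== VERDICT (by name: the statement is the Claim_ definition above) =====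
theorem byte_to_bases_spec : Claim_equal_byte_to_bases := by
  intro x _
  unfold Spec_byte_to_bases
  rw [byte_to_bases_mod, byte_to_bases_alt_mod]
  have h0 : 0 ≤ x % 256 := Int.emod_nonneg x (by norm_num)
  have h1 : x % 256 < 256 := Int.emod_lt_of_pos x (by norm_num)
  have := pv_key ⟨(x % 256).toNat, by omega⟩
  simpa [Int.toNat_of_nonneg h0] using this
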